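-- pv_equiv track=rewrite | github.com/Juniper/contrail-controller | src/config/api-server/vnc_cfg_api_server/resources/port_tuple.py | _get_svc_vlans
-- ===== SOURCE A (Python) =====
-- def _get_svc_vlans(annotations):
--     left_svc_vlan = right_svc_vlan = None
--     if annotations is not None:
--         kvps = annotations.get('key_value_pair')
--         if kvps is not None:
--             for d in kvps:
--                 if d.get('key') == 'left-svc-vlan':
--                     left_svc_vlan = d.get('value')
--                 elif d.get('key') == 'right-svc-vlan':
--                     right_svc_vlan = d.get('value')
--
--     return left_svc_vlan, right_svc_vlan
-- ===== SOURCE B (Python) =====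
-- def _get_svc_vlans(annotations):
--     if annotations is None:
--         return None, None
--     kvps = annotations.get('key_value_pair')
--     if kvps is None:
--         return None, None
--
--     def last_value(tag):
--         # scan backwards; the first match from the end is the last occurrence
--         for d in reversed(kvps):
--             if d.get('key') == tag:
--                 return d.get('value')
--         return None
--
--     return last_value('left-svc-vlan'), last_value('right-svc-vlan')
-- ===== Notes on version B (the rewrite author's own statement) =====
-- stated objective: alternative
-- what changed: Instead of a forward pass maintaining two overwritten variables, B searches the reversed kvps list once per tag and returns the value of the first backward match (equal to A's last occurrence), stopping early; no accumulator state is kept.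
import Mathlib
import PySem

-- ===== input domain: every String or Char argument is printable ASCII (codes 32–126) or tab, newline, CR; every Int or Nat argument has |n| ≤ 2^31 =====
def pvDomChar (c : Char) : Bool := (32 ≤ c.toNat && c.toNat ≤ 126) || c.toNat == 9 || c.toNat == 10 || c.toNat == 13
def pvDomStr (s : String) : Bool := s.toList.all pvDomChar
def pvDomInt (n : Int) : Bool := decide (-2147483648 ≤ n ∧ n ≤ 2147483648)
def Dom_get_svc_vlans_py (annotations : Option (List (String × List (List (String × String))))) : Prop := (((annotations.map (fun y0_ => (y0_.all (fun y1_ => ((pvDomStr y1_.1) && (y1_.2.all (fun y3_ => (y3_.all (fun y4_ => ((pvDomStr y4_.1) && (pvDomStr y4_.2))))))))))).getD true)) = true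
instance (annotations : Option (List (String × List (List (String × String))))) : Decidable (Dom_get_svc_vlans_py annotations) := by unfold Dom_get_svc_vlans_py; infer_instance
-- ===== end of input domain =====

-- B replaces A's forward accumulator scan with a per-tag backward search (first match in reversed kvps = last occurrence), stopping early; objective: alternative decomposition.

-- Python d.get(k) on a dict given as an association list: first match, None if absent (shared dict primitive)
def pyDictGet {β : Type} (d : List (String × β)) (k : String) : Option β :=
  (d.find? (fun p => p.1 == k)).map (·.2)

-- ===== PORT A =====
def get_svc_vlans_py (annotations : Option (List (String × List (List (String × String))))) : Option String × Option String :=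
  match annotations with
  | none => (none, none)
  | some ann =>
    match pyDictGet ann "key_value_pair" with
    | none => (none, none)
    | some kvps =>
      kvps.foldl (fun st d =>
        if pyDictGet d "key" = some "left-svc-vlan" then (pyDictGet d "value", st.2)
        else if pyDictGet d "key" = some "right-svc-vlan" then (st.1, pyDictGet d "value")
        else st) (none, none)

-- ===== PORT B =====
-- B's helper: scan reversed(kvps), return the value of the first match, None if no match
def lastValue (kvps : List (List (String × String))) (tag : String) : Option String :=
  match kvps.reverse.find? (fun d => pyDictGet d "key" == some tag) with
  | some d => pyDictGet d "value"
  | none => none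

def get_svc_vlans_py_alt (annotations : Option (List (String × List (List (String × String))))) : Option String × Option String :=
  match annotations with
  | none => (none, none)
  | some ann =>
    match pyDictGet ann "key_value_pair" with
    | none => (none, none)
    | some kvps => (lastValue kvps "left-svc-vlan", lastValue kvps "right-svc-vlan")

-- ===== PRECONDITION & SPEC =====
def Spec_get_svc_vlans_py (annotations : Option (List (String × List (List (String × String))))) (out : Option String × Option String) : Prop := out = get_svc_vlans_py_alt annotations
instance (annotations : Option (List (String × List (List (String × String))))) (out : Option String × Option String) : Decidable (Spec_get_svc_vlans_py annotations out) := by unfold Spec_get_svc_vlans_py; infer_instance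

-- ===== CLAIM =====
def Claim_equal_get_svc_vlans_py : Prop := ∀ (annotations : Option (List (String × List (List (String × String))))), Dom_get_svc_vlans_py annotations → Spec_get_svc_vlans_py annotations (get_svc_vlans_py annotations)

-- ===== LEMMAS AND PROOFS =====

-- A's single-slot overwrite fold equals B's first-match-in-reverse search (with a general initial slot)
theorem foldl_overwrite_eq_reverse_find (K : String) (ds : List (List (String × String)))
    (init : Option String) :
    ds.foldl (fun x d => if pyDictGet d "key" = some K then pyDictGet d "value" else x) init
      = (match ds.reverse.find? (fun d => pyDictGet d "key" == some K) with
         | some d => pyDictGet d "value"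
         | none => init) := by
  induction ds generalizing init with
  | nil => rfl
  | cons d ds ih =>
    simp only [List.foldl_cons, List.reverse_cons, List.find?_append, ih]
    cases h : ds.reverse.find? (fun d => pyDictGet d "key" == some K) with
    | some e => simp
    | none =>
      simp only [Option.none_or, List.find?]
      by_cases hk : pyDictGet d "key" = some K
      · simp [hk]
      · have hb : (pyDictGet d "key" == some K) = false := by simp [hk]
        rw [hb, if_neg hk]

-- A's pair fold splits into two independent single-slot folds
theorem pair_fold_split (ds : List (List (String × String))) (l r : Option String) :
    ds.foldl (fun st d =>
        if pyDictGet d "key" = some "left-svc-vlan" then (pyDictGet d "value", st.2)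
        else if pyDictGet d "key" = some "right-svc-vlan" then (st.1, pyDictGet d "value")
        else st) (l, r)
      = (ds.foldl (fun x d => if pyDictGet d "key" = some "left-svc-vlan" then pyDictGet d "value" else x) l,
         ds.foldl (fun x d => if pyDictGet d "key" = some "right-svc-vlan" then pyDictGet d "value" else x) r) := by
  induction ds generalizing l r with
  | nil => rfl
  | cons d ds ih =>
    simp only [List.foldl_cons]
    by_cases h1 : pyDictGet d "key" = some "left-svc-vlan"
    · have h2 : ¬ pyDictGet d "key" = some "right-svc-vlan" := by simp [h1]
      rw [if_pos h1, if_pos h1, if_neg h2, ih]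
    · by_cases h2 : pyDictGet d "key" = some "right-svc-vlan"
      · rw [if_neg h1, if_pos h2, if_neg h1, if_pos h2, ih]
      · rw [if_neg h1, if_neg h2, if_neg h1, if_neg h2, ih]

-- ===== VERDICT =====
theorem get_svc_vlans_py_spec : Claim_equal_get_svc_vlans_py := by
  intro annotations _
  unfold Spec_get_svc_vlans_py get_svc_vlans_py get_svc_vlans_py_alt lastValue
  cases annotations with
  | none => rfl
  | some ann =>
    cases h : pyDictGet ann "key_value_pair" with
    | none => simp only [h]
    | some kvps =>
      simp only [h]
      rw [pair_fold_split, foldl_overwrite_eq_reverse_find, foldl_overwrite_eq_reverse_find]
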